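-- pv_equiv track=rewrite | github.com/Alaayed/CTFSaleh | leetcode/Weekly Contests/490/Q2.py | isDigitorialPermutation
-- ===== SOURCE A (Python) =====
-- from collections import defaultdict
--
-- def digit_frequency(n):
-- 	freq = defaultdict(int)
-- 	for digit in str(n):
-- 		freq[int(digit)] += 1
-- 	return freq
--
-- def isDigitorialPermutation(n: int) -> bool:
-- 	temp =1
-- 	fact = [1] + [temp := temp * (i) for i in range(1, 10)]
-- 	# Get factorial of each digit
-- 	res =0
-- 	init_n = n
-- 	while n != 0:
-- 		first_digit = n % 10
-- 		n = n // 10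
-- 		res += fact[first_digit]
-- 	# find if digits can be rearranged
-- 	a = digit_frequency(res)
-- 	b = digit_frequency(init_n)
-- 	return a == b
-- ===== SOURCE B (Python) =====
-- FACT = (1, 1, 2, 6, 24, 120, 720, 5040, 40320, 362880)
--
-- def _digitorial(m):
--     return 0 if m == 0 else FACT[m % 10] + _digitorial(m // 10)
--
-- def isDigitorialPermutation(n: int) -> bool:
--     return sorted(str(_digitorial(n))) == sorted(str(n))
-- ===== Notes on version B (the rewrite author's own statement) =====
-- stated objective: simpler
-- what changed: B replaces A's two defaultdict digit-frequency tables and the dict-equality test with one sorted-digit-string comparison, replaces the walrus-comprehension factorial table with a literal tuple, and computes the digit-factorial sum by direct recursion instead of A's while loop with an accumulator.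
import Mathlib
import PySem

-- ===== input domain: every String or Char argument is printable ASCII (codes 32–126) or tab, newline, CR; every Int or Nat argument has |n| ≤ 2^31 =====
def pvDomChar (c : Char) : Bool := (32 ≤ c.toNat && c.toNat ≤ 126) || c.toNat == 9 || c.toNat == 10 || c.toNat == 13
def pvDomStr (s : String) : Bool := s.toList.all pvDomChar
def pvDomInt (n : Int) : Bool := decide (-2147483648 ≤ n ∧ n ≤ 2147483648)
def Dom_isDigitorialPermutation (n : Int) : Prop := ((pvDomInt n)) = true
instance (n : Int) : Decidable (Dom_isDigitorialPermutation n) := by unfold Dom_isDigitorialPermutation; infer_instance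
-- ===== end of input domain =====

-- B replaces A's two digit-frequency dicts + Python dict equality by a sorted-digit-string
-- comparison and computes the digit-factorial sum by direct recursion over a literal table
-- (objective: simpler).

-- ===== PORT A =====

-- helper digit_frequency of Source A: defaultdict(int) counting int(digit) over str(n)
def pvDigitFrequency (m : Int) : PySem.Dict Int Int :=
  (PySem.Int.toChars m).foldl
    (fun d c => d.modify ((PySem.Int.ofChars? [c]).getD 0) 0 (· + 1)) PySem.Dict.empty

-- Python's `a == b` on dicts: same size and every item of a found in b (order-insensitive)
def pvDictEq (a b : PySem.Dict Int Int) : Bool :=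
  (a.size == b.size) && a.items.all (fun kv => b.get? kv.1 == some kv.2)

-- A's `while n != 0` loop; for m < 0 the Python loop never terminates (excluded by Pre_),
-- the port returns the accumulator there as a totality guard.
def pvLoopA (fact : List Int) (m res : Int) : Int :=
  if m = 0 then res
  else if m < 0 then res
  else pvLoopA fact (PySem.Int.floordiv m 10)
        (res + PySem.List.pyGetD fact (PySem.Int.mod m 10) 0)
termination_by m.toNat
decreasing_by
  have h : PySem.Int.floordiv m 10 = m / 10 := PySem.Int.floordiv_eq_ediv_of_pos (by omega)
  rw [h]; omega

def isDigitorialPermutation (n : Int) : Bool :=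
  -- temp = 1; fact = [1] + [temp := temp * i for i in range(1, 10)]
  let fact : List Int :=
    [1] ++ (((PySem.List.pyRange 1 10 1).foldl
      (fun (st : List Int × Int) i => (st.1 ++ [st.2 * i], st.2 * i)) ([], 1)).1)
  let res := pvLoopA fact n 0
  pvDictEq (pvDigitFrequency res) (pvDigitFrequency n)

-- ===== PORT B =====

def pvFACT : List Int := [1, 1, 2, 6, 24, 120, 720, 5040, 40320, 362880]

-- Source B's _digitorial; for m < 0 the Python recursion never terminates (excluded by Pre_),
-- the port returns 0 there as a totality guard.
def pvDigitorial (m : Int) : Int :=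
  if m = 0 then 0
  else if m < 0 then 0
  else PySem.List.pyGetD pvFACT (PySem.Int.mod m 10) 0 + pvDigitorial (PySem.Int.floordiv m 10)
termination_by m.toNat
decreasing_by
  have h : PySem.Int.floordiv m 10 = m / 10 := PySem.Int.floordiv_eq_ediv_of_pos (by omega)
  rw [h]; omega

def isDigitorialPermutation_alt (n : Int) : Bool :=
  PySem.List.sorted (PySem.Int.toChars (pvDigitorial n)) (fun c => c) false
    == PySem.List.sorted (PySem.Int.toChars n) (fun c => c) false

-- ===== PRECONDITION & SPEC =====
-- Pre_ excludes negative n, on which A's `while n != 0` loop never terminates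
-- (B's recursion on a negative n never terminates either); A returns on exactly the n ≥ 0.
def Pre_isDigitorialPermutation (n : Int) : Prop := 0 ≤ n
instance (n : Int) : Decidable (Pre_isDigitorialPermutation n) := by
  unfold Pre_isDigitorialPermutation; infer_instance

def pvWitness_isDigitorialPermutation : Int := 145

def Spec_isDigitorialPermutation (n : Int) (out : Bool) : Prop := out = isDigitorialPermutation_alt n
instance (n : Int) (out : Bool) : Decidable (Spec_isDigitorialPermutation n out) := by
  unfold Spec_isDigitorialPermutation; infer_instance

-- ===== CLAIM (what is proved, stated in full; the proofs are below) =====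
def Claim_equal_isDigitorialPermutation : Prop := ∀ (n : Int), Dom_isDigitorialPermutation n → Pre_isDigitorialPermutation n → Spec_isDigitorialPermutation n (isDigitorialPermutation n)

-- ===== LEMMAS AND PROOFS =====

-- A's comprehension-built factorial table is B's literal table
theorem pvFact_eq :
    [(1 : Int)] ++ (((PySem.List.pyRange 1 10 1).foldl
      (fun (st : List Int × Int) i => (st.1 ++ [st.2 * i], st.2 * i)) ([], 1)).1) = pvFACT := by
  decide

-- A's while loop is B's recursion plus the accumulator
theorem pvLoopA_eq_digitorial (m res : Int) :
    pvLoopA pvFACT m res = res + pvDigitorial m := by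
  rw [pvLoopA, pvDigitorial]
  split_ifs with h1 h2
  · ring
  · ring
  · rw [pvLoopA_eq_digitorial]; ring
termination_by m.toNat
decreasing_by
  have h : PySem.Int.floordiv m 10 = m / 10 := PySem.Int.floordiv_eq_ediv_of_pos (by omega)
  rw [h]; omega

-- the digit-factorial sum is nonnegative
theorem pvDigitorial_nonneg (m : Int) : 0 ≤ pvDigitorial m := by
  rw [pvDigitorial]
  split_ifs with h1 h2
  · omega
  · omega
  · have hrec := pvDigitorial_nonneg (PySem.Int.floordiv m 10)
    have hm : PySem.Int.mod m 10 = m % 10 := PySem.Int.mod_eq_emod_of_pos (by omega)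
    have hb1 : 0 ≤ m % 10 := Int.emod_nonneg m (by omega)
    have hb2 : m % 10 < 10 := Int.emod_lt_of_pos m (by omega)
    have hget : 0 ≤ PySem.List.pyGetD pvFACT (PySem.Int.mod m 10) 0 := by
      rw [hm]
      interval_cases h : m % 10 <;> simp [PySem.List.pyGetD, pvFACT]
    omega
termination_by m.toNat
decreasing_by
  have h : PySem.Int.floordiv m 10 = m / 10 := PySem.Int.floordiv_eq_ediv_of_pos (by omega)
  rw [h]; omega

-- every character of str(m), m ≥ 0, is a decimal digit character
theorem pvToDigitsCore_digits (fuel : Nat) : ∀ (n : Nat) (acc : List Char),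
    (∀ c ∈ acc, c ∈ ['0','1','2','3','4','5','6','7','8','9']) →
    ∀ c ∈ Nat.toDigitsCore 10 fuel n acc, c ∈ ['0','1','2','3','4','5','6','7','8','9'] := by
  induction fuel with
  | zero => intro n acc hacc c hc; simp only [Nat.toDigitsCore] at hc; exact hacc c hc
  | succ f ih =>
    intro n acc hacc c hc
    have hd : (n % 10).digitChar ∈ ['0','1','2','3','4','5','6','7','8','9'] := by
      have h10 : n % 10 < 10 := Nat.mod_lt _ (by omega)
      interval_cases h : n % 10 <;> simp [Nat.digitChar]
    simp only [Nat.toDigitsCore] at hc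
    split at hc
    · rcases List.mem_cons.1 hc with h | h
      · exact h ▸ hd
      · exact hacc c h
    · exact ih _ _ (by intro x hx; rcases List.mem_cons.1 hx with h|h; exacts [h ▸ hd, hacc x h]) c hc

theorem pvToChars_digits (m : Int) (hm : 0 ≤ m) :
    ∀ c ∈ PySem.Int.toChars m, c ∈ ['0','1','2','3','4','5','6','7','8','9'] := by
  intro c hc
  unfold PySem.Int.toChars at hc
  rw [if_neg (by omega)] at hc
  exact pvToDigitsCore_digits _ _ _ (by simp) c hc

-- int(c) for a digit character, followed by re-printing, is the identity
theorem pvVal_roundtrip (c : Char) (hc : c ∈ ['0','1','2','3','4','5','6','7','8','9']) :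
    Char.ofNat ((((PySem.Int.ofChars? [c]).getD 0)).toNat + 48) = c := by
  fin_cases hc <;> decide

-- digit_frequency is Counter of the digit values
theorem pvDigitFrequency_eq_counter (m : Int) :
    pvDigitFrequency m
      = PySem.Dict.counter ((PySem.Int.toChars m).map (fun c => (PySem.Int.ofChars? [c]).getD 0)) := by
  rw [PySem.Dict.counter_eq_foldl, List.foldl_map]
  rfl

theorem get?_counter_int (ys : List Int) (k : Int) :
    (PySem.Dict.counter ys).get? k = if k ∈ ys then some ((ys.count k : Int)) else none := by
  have hc := PySem.Dict.contains_counter ys k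
  rw [PySem.Dict.contains_eq_isSome_get?] at hc
  by_cases h : k ∈ ys
  · have hs : ((PySem.Dict.counter ys).get? k).isSome = true := by rw [hc]; simpa using h
    rcases Option.isSome_iff_exists.1 hs with ⟨w, hw⟩
    have h2 := PySem.Dict.getD_counter ys k
    rw [PySem.Dict.getD_eq_get?_getD, hw, Option.getD_some] at h2
    rw [hw, if_pos h, h2]
  · have hs : ((PySem.Dict.counter ys).get? k).isSome = false := by rw [hc]; simpa using h
    cases ho : (PySem.Dict.counter ys).get? k with
    | none => rw [if_neg h]
    | some w => rw [ho] at hs; simp at hs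

theorem size_counter_int (xs : List Int) :
    (PySem.Dict.counter xs).size = (PySem.Set.ofList xs).length := by
  have h : (PySem.Dict.counter xs).size = (PySem.Dict.counter xs).items.length := rfl
  rw [h, PySem.Dict.items_counter, List.length_map]

theorem toFinset_ofList (xs : List Int) : (PySem.Set.ofList xs).toFinset = xs.toFinset := by
  ext v; simp [PySem.Set.mem_ofList]

theorem len_ofList_eq_card (xs : List Int) :
    (PySem.Set.ofList xs).length = xs.toFinset.card := by
  rw [← toFinset_ofList, List.toFinset_card_of_nodup (PySem.Set.nodup_ofList xs)]

-- Python dict equality of two Counters is permutation of the counted lists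
theorem pvDictEq_counter (xs ys : List Int) :
    pvDictEq (PySem.Dict.counter xs) (PySem.Dict.counter ys) = true ↔ xs.Perm ys := by
  unfold pvDictEq
  rw [Bool.and_eq_true, beq_iff_eq, List.all_eq_true]
  constructor
  · rintro ⟨hsize, hall⟩
    have hcnt : ∀ k ∈ xs, k ∈ ys ∧ ys.count k = xs.count k := by
      intro k hk
      have hmem : (k, (xs.count k : Int)) ∈ (PySem.Dict.counter xs).items := by
        rw [PySem.Dict.items_counter]
        exact List.mem_map.2 ⟨k, (PySem.Set.mem_ofList xs k).2 hk, rfl⟩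
      have h1 := hall _ hmem
      simp only [beq_iff_eq, get?_counter_int] at h1
      by_cases hky : k ∈ ys
      · rw [if_pos hky] at h1
        exact ⟨hky, by exact_mod_cast Option.some.inj h1⟩
      · rw [if_neg hky] at h1; exact absurd h1 (by simp)
    have hsub : xs.toFinset ⊆ ys.toFinset := by
      intro v hv
      simp only [List.mem_toFinset] at *
      exact (hcnt v hv).1
    have hcard : ys.toFinset.card ≤ xs.toFinset.card := by
      rw [size_counter_int, size_counter_int, len_ofList_eq_card, len_ofList_eq_card] at hsize
      omega
    have hfin : xs.toFinset = ys.toFinset := Finset.eq_of_subset_of_card_le hsub hcard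
    rw [List.perm_iff_count]
    intro v
    by_cases hv : v ∈ xs
    · exact ((hcnt v hv).2).symm
    · have hv' : v ∉ ys := by
        intro h
        exact hv (List.mem_toFinset.1 (hfin ▸ List.mem_toFinset.2 h))
      rw [List.count_eq_zero_of_not_mem hv, List.count_eq_zero_of_not_mem hv']
  · intro hperm
    have hfin : xs.toFinset = ys.toFinset := by
      ext v; simp [hperm.mem_iff]
    constructor
    · rw [size_counter_int, size_counter_int, len_ofList_eq_card, len_ofList_eq_card, hfin]
    · intro kv hkv
      rw [PySem.Dict.items_counter] at hkv
      rcases List.mem_map.1 hkv with ⟨k, hk, rfl⟩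
      have hkx : k ∈ xs := (PySem.Set.mem_ofList xs k).1 hk
      rw [beq_iff_eq, get?_counter_int, if_pos (hperm.mem_iff.1 hkx), hperm.count_eq k]

-- permutation of the digit-value lists is permutation of the character lists (m, r ≥ 0)
theorem pvPerm_map_val_iff (cr cm : List Char)
    (hr : ∀ c ∈ cr, c ∈ ['0','1','2','3','4','5','6','7','8','9'])
    (hm : ∀ c ∈ cm, c ∈ ['0','1','2','3','4','5','6','7','8','9']) :
    (cr.map (fun c => (PySem.Int.ofChars? [c]).getD 0)).Perm
      (cm.map (fun c => (PySem.Int.ofChars? [c]).getD 0)) ↔ cr.Perm cm := by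
  constructor
  · intro h
    have hg := h.map (fun v : Int => Char.ofNat (v.toNat + 48))
    rw [List.map_map, List.map_map] at hg
    simp only [Function.comp_def] at hg
    rwa [List.map_congr_left (fun c hc => pvVal_roundtrip c (hr c hc)), List.map_id',
      List.map_congr_left (fun c hc => pvVal_roundtrip c (hm c hc)), List.map_id'] at hg
  · exact fun h => h.map _

-- ===== VERDICT (by name: the statement is the Claim_ definition above) =====
theorem isDigitorialPermutation_spec : Claim_equal_isDigitorialPermutation := by
  unfold Claim_equal_isDigitorialPermutation
  intro n _ hpre
  have hn : (0 : Int) ≤ n := hpre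
  unfold Spec_isDigitorialPermutation
  show pvDictEq
      (pvDigitFrequency (pvLoopA ([1] ++ (((PySem.List.pyRange 1 10 1).foldl
        (fun (st : List Int × Int) i => (st.1 ++ [st.2 * i], st.2 * i)) ([], 1)).1)) n 0))
      (pvDigitFrequency n) = isDigitorialPermutation_alt n
  rw [pvFact_eq, pvLoopA_eq_digitorial, zero_add]
  unfold isDigitorialPermutation_alt
  rw [Bool.eq_iff_iff]
  rw [beq_iff_eq, PySem.List.sorted_id_eq_sorted_id_iff_perm]
  rw [pvDigitFrequency_eq_counter, pvDigitFrequency_eq_counter, pvDictEq_counter]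
  exact pvPerm_map_val_iff _ _ (pvToChars_digits _ (pvDigitorial_nonneg n)) (pvToChars_digits _ hn)
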